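-- pv_equiv track=rewrite | github.com/aj-das-research/V2XChat | app.py | highlight_excerpts
-- ===== SOURCE A (Python) =====
-- def highlight_excerpts(full_text, violations, colors):
--     """
--     Highlights excerpts of violations in the full text with corresponding colors.
--     :param full_text: The full translation text.
--     :param violations: List of violation data.
--     :param colors: List of colors corresponding to each violation.
--     :return: HTML formatted string with highlighted excerpts.
--     """
--     highlighted_text = full_text
--
--     # Prepare highlighted text with an ordered list of start and end indices
--     highlight_positions = []
--
--     for i, violation in enumerate(violations):
--         excerpt = violation.get("excerpt_content", "").strip()
--         color = colors[i]
--
--         if excerpt: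
--             # Find all occurrences of the excerpt and store positions
--             start_pos = 0
--             while start_pos < len(highlighted_text):
--                 start_pos = highlighted_text.find(excerpt, start_pos)
--                 if start_pos == -1:
--                     break
--                 highlight_positions.append((start_pos, start_pos + len(excerpt), color))
--                 start_pos += len(excerpt)
--
--     # Sort positions by start index to ensure correct highlighting sequence
--     highlight_positions.sort()
--
--     # Rebuild the highlighted text with HTML tags
--     offset = 0
--     for start, end, color in highlight_positions:
--         start += offset
--         end += offset
--         highlighted_text = (
--             highlighted_text[:start] +
--             f'<span style="background-color: {color}; color: #fff;">{highlighted_text[start:end]}</span>' +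
--             highlighted_text[end:]
--         )
--         offset += len(f'<span style="background-color: {color}; color: #fff;"></span>')
--
--     return highlighted_text
-- ===== SOURCE B (Python) =====
-- def highlight_excerpts(full_text, violations, colors):
--     """
--     Same result as A, by a different route: for each (violation, color) pair,
--     walk an index across the text checking startswith at each position
--     (stepping over a match so occurrences never overlap within one excerpt),
--     then sort the match triples once and emit the untouched gaps and wrapped
--     excerpts as segments joined in a single pass (no repeated whole-string
--     splicing, no offset bookkeeping).
--     """
--     matches = []
--     for violation, color in zip(violations, colors):
--         excerpt = violation.get("excerpt_content", "").strip()
--         if excerpt: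
--             i = 0
--             while i + len(excerpt) <= len(full_text):
--                 if full_text.startswith(excerpt, i):
--                     matches.append((i, i + len(excerpt), color))
--                     i += len(excerpt)
--                 else:
--                     i += 1
--     matches.sort()
--
--     parts = []
--     last = 0
--     for start, end, color in matches:
--         parts.append(full_text[last:start])
--         parts.append(f'<span style="background-color: {color}; color: #fff;">{full_text[start:end]}</span>')
--         last = end
--     parts.append(full_text[last:])
--     return ''.join(parts)
-- ===== Notes on version B (the rewrite author's own statement) =====
-- stated objective: alternative
-- what changed: A repeatedly calls str.find and re-splices the whole string per match with offset bookkeeping; B walks an index with startswith to collect the same non-overlapping match triples, sorts them once, and joins gap/wrapped-excerpt segments in one pass.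
import Mathlib
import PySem

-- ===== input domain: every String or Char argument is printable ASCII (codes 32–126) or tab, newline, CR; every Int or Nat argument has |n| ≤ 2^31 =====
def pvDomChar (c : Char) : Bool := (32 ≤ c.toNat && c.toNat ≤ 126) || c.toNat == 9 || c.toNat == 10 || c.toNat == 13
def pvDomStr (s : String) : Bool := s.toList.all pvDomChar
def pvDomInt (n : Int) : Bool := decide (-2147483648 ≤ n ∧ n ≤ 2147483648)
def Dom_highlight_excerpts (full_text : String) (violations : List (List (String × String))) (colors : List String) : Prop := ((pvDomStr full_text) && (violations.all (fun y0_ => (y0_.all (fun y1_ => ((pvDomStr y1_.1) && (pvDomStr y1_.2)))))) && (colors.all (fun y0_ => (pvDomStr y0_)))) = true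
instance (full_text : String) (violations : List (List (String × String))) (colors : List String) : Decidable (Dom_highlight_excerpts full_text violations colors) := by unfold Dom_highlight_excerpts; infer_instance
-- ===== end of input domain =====

-- B collects the same non-overlapping matches by walking an index with startswith
-- (instead of A's repeated str.find), sorts once, and joins gap/excerpt segments
-- (instead of A's per-match whole-string splicing with offset bookkeeping); equal
-- wherever the matched occurrences do not overlap (Pre_), which both implicitly assume.

-- shared helpers: the HTML tag texts and Python's list.sort() on (int,int,str) triples
def pvOpenTag (color : String) : List Char :=
  "<span style=\"background-color: ".toList ++ color.toList ++ "; color: #fff;\">".toList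

def pvCloseTag : List Char := "</span>".toList

-- Python '<' on (int, int, str) tuples (lexicographic)
def pvLt3 (a b : Nat × Nat × String) : Bool :=
  decide (a.1 < b.1 ∨ (a.1 = b.1 ∧ (a.2.1 < b.2.1 ∨ (a.2.1 = b.2.1 ∧ a.2.2 < b.2.2))))

-- list.sort() — stable insertion by '<' (PySem.List.sorted_eq_foldl_insertBy shape)
def pvSort3 (xs : List (Nat × Nat × String)) : List (Nat × Nat × String) :=
  xs.foldl (fun acc x => PySem.List.insertBy pvLt3 x acc) []

-- ===== PORT A =====
-- A's while-loop: find(excerpt, start_pos) while start_pos < len(text), step by len(excerpt).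
-- (the 'excerpt = []' guard is unreachable: the caller only scans a non-empty excerpt)
def pvScanA (text excerpt : List Char) (color : String) (start : Nat) : List (Nat × Nat × String) :=
  if hex : excerpt.isEmpty then []
  else if h : start < text.length then
    if hf : PySem.Chars.findFrom text excerpt (start : Int) none = -1 then []
    else ((PySem.Chars.findFrom text excerpt (start : Int) none).toNat,
          (PySem.Chars.findFrom text excerpt (start : Int) none).toNat + excerpt.length, color)
           :: pvScanA text excerpt color ((PySem.Chars.findFrom text excerpt (start : Int) none).toNat + excerpt.length)
  else []
termination_by text.length - start
decreasing_by
  have hs := (PySem.Chars.findFrom_natCast_spec text excerpt start (Nat.le_of_lt h) hf).1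
  have hne : excerpt.length ≠ 0 := by simpa [List.isEmpty_iff_length_eq_zero] using hex
  omega

def pvGatherA (full_text : String) (violations : List (List (String × String))) (colors : List String) : List (Nat × Nat × String) :=
  (PySem.List.enumerate violations 0).foldl
    (fun acc iv =>
      let excerpt := PySem.Str.strip (PySem.Dict.getD (⟨iv.2⟩ : PySem.Dict String String) "excerpt_content" "")
      let color := PySem.List.pyGetD colors iv.1 ""
      acc ++ (if excerpt ≠ "" then pvScanA full_text.toList excerpt.toList color 0 else []))
    []

-- one pass of A's rebuild loop: splice the tags into the working string at offset-shifted indices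
def pvStepA (st : List Char × Nat) (p : Nat × Nat × String) : List Char × Nat :=
  let s : Nat := p.1 + st.2
  let e : Nat := p.2.1 + st.2
  (PySem.List.slice st.1 none (some (s : Int)) ++
     pvOpenTag p.2.2 ++ PySem.List.slice st.1 (some (s : Int)) (some (e : Int)) ++ pvCloseTag ++
     PySem.List.slice st.1 (some (e : Int)) none,
   st.2 + ((pvOpenTag p.2.2).length + pvCloseTag.length))

def highlight_excerpts (full_text : String) (violations : List (List (String × String))) (colors : List String) : String :=
  String.ofList ((pvSort3 (pvGatherA full_text violations colors)).foldl pvStepA (full_text.toList, 0)).1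

-- ===== PORT B =====
-- B's index walk: while i + len(excerpt) <= len(text): startswith(excerpt, i) ?
--   record and jump by len(excerpt) : step by 1.
-- full_text.startswith(excerpt, i) is Chars.startswith on text.drop i (exact for 0 ≤ i).
-- (the isEmpty guard only makes the recursion total; the caller never passes an empty excerpt)
def pvScanB (text excerpt : List Char) (color : String) (i : Nat) : List (Nat × Nat × String) :=
  if hex : excerpt.isEmpty then []
  else if h : i + excerpt.length ≤ text.length then
    if PySem.Chars.startswith (text.drop i) excerpt then
      (i, i + excerpt.length, color) :: pvScanB text excerpt color (i + excerpt.length)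
    else pvScanB text excerpt color (i + 1)
  else []
termination_by text.length - i
decreasing_by
  · have hne : excerpt.length ≠ 0 := by simpa [List.isEmpty_iff_length_eq_zero] using hex
    omega
  · have hne : excerpt.length ≠ 0 := by simpa [List.isEmpty_iff_length_eq_zero] using hex
    omega

-- B's 'for violation, color in zip(violations, colors)'
def pvGatherB (full_text : String) (violations : List (List (String × String))) (colors : List String) : List (Nat × Nat × String) :=
  (violations.zip colors).foldl
    (fun acc vc =>
      let excerpt := PySem.Str.strip (PySem.Dict.getD (⟨vc.1⟩ : PySem.Dict String String) "excerpt_content" "")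
      acc ++ (if excerpt ≠ "" then pvScanB full_text.toList excerpt.toList vc.2 0 else []))
    []

-- one pass of B's segment loop: append gap, open tag, excerpt, close tag; remember the end
def pvStepB (ft : List Char) (st : List Char × Nat) (p : Nat × Nat × String) : List Char × Nat :=
  (st.1 ++ PySem.List.slice ft (some (st.2 : Int)) (some (p.1 : Int)) ++
     pvOpenTag p.2.2 ++ PySem.List.slice ft (some (p.1 : Int)) (some (p.2.1 : Int)) ++ pvCloseTag,
   p.2.1)

def highlight_excerpts_alt (full_text : String) (violations : List (List (String × String))) (colors : List String) : String :=
  let ft := full_text.toList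
  let st := (pvSort3 (pvGatherB full_text violations colors)).foldl (pvStepB ft) ([], 0)
  String.ofList (st.1 ++ PySem.List.slice ft (some (st.2 : Int)) none)

-- ===== PRECONDITION & SPEC =====
-- the stripped excerpt of one violation, as the character list searched for in the text
def pvExcerptOf (v : List (String × String)) : List Char :=
  (PySem.Str.strip (PySem.Dict.getD (⟨v⟩ : PySem.Dict String String) "excerpt_content" "")).toList

-- Pre_ excludes (a) inputs with more violations than colors, where A raises IndexError,
-- and (b) inputs where two occurrences of (stripped, non-empty) excerpts overlap in the
-- text, where A's offset-splicing lands inside previously inserted HTML — an accident of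
-- A's rebuild on which neither output is specified. Clause (b) is stated over ALL
-- occurrences, so it also excludes some inputs whose overlapping self-occurrences the
-- greedy scan skips (A and B agree there); see the cites in the claim.
def Pre_highlight_excerpts (full_text : String) (violations : List (List (String × String))) (colors : List String) : Prop :=
  violations.length ≤ colors.length ∧
  List.Pairwise (fun v w =>
    ∀ p ∈ List.range (full_text.toList.length + 1), ∀ q ∈ List.range (full_text.toList.length + 1),
      pvExcerptOf v ≠ [] → pvExcerptOf w ≠ [] →
      pvExcerptOf v <+: full_text.toList.drop p → pvExcerptOf w <+: full_text.toList.drop q →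
      p + (pvExcerptOf v).length ≤ q ∨ q + (pvExcerptOf w).length ≤ p) violations

instance (full_text : String) (violations : List (List (String × String))) (colors : List String) : Decidable (Pre_highlight_excerpts full_text violations colors) := by unfold Pre_highlight_excerpts; infer_instance

def pvWitness_highlight_excerpts : String × (List (List (String × String))) × List String :=
  ("no x, no y", [[("excerpt_content", " x ")], [("other", "z")], [("excerpt_content", "y")]],
   ["#f00", "#0f0", "#00f"])

def Spec_highlight_excerpts (full_text : String) (violations : List (List (String × String))) (colors : List String) (out : String) : Prop := out = highlight_excerpts_alt full_text violations colors
instance (full_text : String) (violations : List (List (String × String))) (colors : List String) (out : String) : Decidable (Spec_highlight_excerpts full_text violations colors out) := by unfold Spec_highlight_excerpts; infer_instance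

-- ===== CLAIM (what is proved, stated in full; the proofs are below) =====
def Claim_equal_highlight_excerpts : Prop := ∀ (full_text : String) (violations : List (List (String × String))) (colors : List String), Dom_highlight_excerpts full_text violations colors → Pre_highlight_excerpts full_text violations colors → Spec_highlight_excerpts full_text violations colors (highlight_excerpts full_text violations colors)

-- ===== LEMMAS AND PROOFS =====

-- occurrence of a non-empty excerpt anywhere in drop k ↔ at some position ≥ k
lemma pvInfix_drop_iff (text excerpt : List Char) (k : Nat) :
    excerpt <:+: text.drop k ↔ ∃ j, k ≤ j ∧ excerpt <+: text.drop j := by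
  constructor
  · intro h
    have := (PySem.Chars.isIn_iff_infix excerpt (text.drop k)).2 h
    have := (PySem.Chars.exists_prefix_drop_iff_isIn excerpt (text.drop k)).2 this
    obtain ⟨j, hj⟩ := this
    rw [List.drop_drop] at hj
    exact ⟨k + j, Nat.le_add_right _ _, hj⟩
  · intro ⟨j, hkj, hj⟩
    have : excerpt <+: (text.drop k).drop (j - k) := by
      rw [List.drop_drop, Nat.add_sub_cancel' hkj]
      exact hj
    have : PySem.Chars.isIn excerpt (text.drop k) = true :=
      (PySem.Chars.exists_prefix_drop_iff_isIn excerpt (text.drop k)).1 ⟨j - k, this⟩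
    exact (PySem.Chars.isIn_iff_infix _ _).1 this

-- a prefix occurrence fits: j + |excerpt| ≤ |text|
lemma pvOcc_fits (text excerpt : List Char) (j : Nat) (hne : excerpt.length ≠ 0)
    (h : excerpt <+: text.drop j) :
    j + excerpt.length ≤ text.length := by
  have := h.length_le
  simp only [List.length_drop] at this
  omega

-- findFrom at i, when an occurrence exists at i, returns exactly i
lemma pvFindFrom_here (text excerpt : List Char) (i : Nat)
    (hil : i ≤ text.length) (hocc : excerpt <+: text.drop i) :
    PySem.Chars.findFrom text excerpt (i : Int) none = (i : Int) := by
  rw [PySem.Chars.findFrom_natCast text excerpt i hil]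
  have hinf : excerpt <:+: text.drop i := hocc.isInfix
  have hne : PySem.Chars.find (text.drop i) excerpt ≠ -1 :=
    (PySem.Chars.find_ne_neg_one_iff _ _).2 hinf
  have hnn : 0 ≤ PySem.Chars.find (text.drop i) excerpt :=
    (PySem.Chars.find_nonneg_iff _ _).2 hinf
  have hspec := PySem.Chars.find_spec hnn
  have hzero : (PySem.Chars.find (text.drop i) excerpt).toNat = 0 := by
    by_contra hz
    have := hspec.2 0 (Nat.pos_of_ne_zero hz)
    simp only [List.drop_zero] at this
    exact this hocc
  have : PySem.Chars.find (text.drop i) excerpt = 0 := by omega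
  simp [this]

-- findFrom skips a position with no occurrence
lemma pvFindFrom_step (text excerpt : List Char) (i : Nat)
    (hil : i < text.length) (hnocc : ¬ excerpt <+: text.drop i) :
    PySem.Chars.findFrom text excerpt (i : Int) none
      = PySem.Chars.findFrom text excerpt ((i + 1 : Nat) : Int) none := by
  have hil' : i ≤ text.length := Nat.le_of_lt hil
  have hil1 : i + 1 ≤ text.length := hil
  by_cases hf : PySem.Chars.findFrom text excerpt (i : Int) none = -1
  · have h1 : ¬ excerpt <:+: text.drop i :=
      (PySem.Chars.findFrom_natCast_eq_neg_one_iff text excerpt i hil').1 hf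
    have h2 : ¬ excerpt <:+: text.drop (i + 1) := by
      intro h
      apply h1
      rw [pvInfix_drop_iff] at h ⊢
      obtain ⟨j, hj1, hj2⟩ := h
      exact ⟨j, by omega, hj2⟩
    rw [hf, Eq.comm, (PySem.Chars.findFrom_natCast_eq_neg_one_iff text excerpt (i+1) hil1)]
    exact h2
  · have hs := PySem.Chars.findFrom_natCast_spec text excerpt i hil' hf
    set r := PySem.Chars.findFrom text excerpt (i : Int) none with hr
    have hnn : 0 ≤ r := le_trans (by exact_mod_cast Int.natCast_nonneg i) hs.1
    have hrn : (i : Int) ≤ r := hs.1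
    have hri : r.toNat ≠ i := by
      intro h
      exact hnocc (h ▸ hs.2.1)
    have hri1 : i + 1 ≤ r.toNat := by omega
    -- an occurrence exists at r.toNat ≥ i+1, so findFrom (i+1) ≠ -1
    have hf1 : PySem.Chars.findFrom text excerpt ((i + 1 : Nat) : Int) none ≠ -1 := by
      rw [Ne, PySem.Chars.findFrom_natCast_eq_neg_one_iff text excerpt (i+1) hil1, not_not,
        pvInfix_drop_iff]
      exact ⟨r.toNat, hri1, hs.2.1⟩
    have hs1 := PySem.Chars.findFrom_natCast_spec text excerpt (i+1) hil1 hf1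
    set r1 := PySem.Chars.findFrom text excerpt ((i + 1 : Nat) : Int) none with hr1
    have hnn1 : 0 ≤ r1 := le_trans (by exact_mod_cast Int.natCast_nonneg (i+1)) hs1.1
    -- r ≤ r1 : minimality of r; r1 ≤ r : minimality of r1
    have h1 : ¬ r1.toNat < r.toNat := fun hlt =>
      hs.2.2 r1.toNat (by omega) hlt hs1.2.1
    have h2 : ¬ r.toNat < r1.toNat := fun hlt =>
      hs1.2.2 r.toNat hri1 hlt hs.2.1
    omega

-- from start = |text| (or beyond the last fitting position) nothing is found
lemma pvFindFrom_none (text excerpt : List Char) (i : Nat) (hne : excerpt.length ≠ 0)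
    (hil : i ≤ text.length) (hbig : ¬ i + excerpt.length ≤ text.length) :
    PySem.Chars.findFrom text excerpt (i : Int) none = -1 := by
  rw [PySem.Chars.findFrom_natCast_eq_neg_one_iff text excerpt i hil, pvInfix_drop_iff]
  rintro ⟨j, hij, hj⟩
  have := pvOcc_fits text excerpt j hne hj
  omega

-- A's find-stepping scan and B's index walk produce the same occurrence list
lemma pvScan_eq (text excerpt : List Char) (color : String) :
    ∀ i, i ≤ text.length → pvScanB text excerpt color i = pvScanA text excerpt color i := by
  intro i
  fun_induction pvScanB text excerpt color i with
  | case1 i hex =>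
      intro _; rw [pvScanA]; simp [hex]
  | case2 i hex h hsw ih =>
      intro hil
      have hne : excerpt.length ≠ 0 := by simpa [List.isEmpty_iff_length_eq_zero] using hex
      have hocc : excerpt <+: text.drop i := (PySem.Chars.startswith_iff _ _).1 hsw
      have hff := pvFindFrom_here text excerpt i hil hocc
      have hlt : i < text.length := by omega
      rw [pvScanA]
      rw [dif_neg hex, dif_pos hlt]
      rw [ih (by omega)]
      have hfne : PySem.Chars.findFrom text excerpt (i : Int) none ≠ -1 := by
        rw [hff]; omega
      rw [dif_neg hfne]
      simp [hff]
  | case3 i hex h hsw ih =>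
      intro hil
      have hne : excerpt.length ≠ 0 := by simpa [List.isEmpty_iff_length_eq_zero] using hex
      have hlt : i < text.length := by omega
      have hnocc : ¬ excerpt <+: text.drop i := by
        intro hocc
        exact hsw ((PySem.Chars.startswith_iff _ _).2 hocc)
      have hstep := pvFindFrom_step text excerpt i hlt hnocc
      rw [ih (by omega)]
      -- scanA at i equals scanA at i+1: same findFrom value, and if found the
      -- recursive call targets the same position
      conv_lhs => rw [pvScanA]
      conv_rhs => rw [pvScanA]
      rw [dif_neg hex, dif_neg hex, dif_pos hlt, hstep]
      by_cases hf : PySem.Chars.findFrom text excerpt ((i + 1 : Nat) : Int) none = -1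
      · rw [dif_pos hf]
        by_cases h1 : i + 1 < text.length
        · rw [dif_pos h1]
        · rw [dif_neg h1]
      · have hs1 := PySem.Chars.findFrom_natCast_spec text excerpt (i+1) (by omega) hf
        have hfit := pvOcc_fits text excerpt _ hne hs1.2.1
        have h1 : i + 1 < text.length := by
          have h2 : (i + 1 : Int) ≤ PySem.Chars.findFrom text excerpt ((i + 1 : Nat) : Int) none := by
            exact_mod_cast hs1.1
          omega
        rw [dif_pos h1, dif_neg hf]
  | case4 i hex h =>
      intro hil
      have hne : excerpt.length ≠ 0 := by simpa [List.isEmpty_iff_length_eq_zero] using hex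
      rw [pvScanA]
      rw [dif_neg hex]
      by_cases hlt : i < text.length
      · rw [dif_pos hlt, dif_pos (pvFindFrom_none text excerpt i hne hil h)]
      · rw [dif_neg hlt]

-- enumerate-with-indexing and zip walk the same (violation, color) pairs
lemma pvEnum_zip {X : Type} (F : List (String × String) → String → List X) :
    ∀ (vs : List (List (String × String))) (colors : List String) (s : Nat),
      s + vs.length ≤ colors.length →
      (PySem.List.enumerate vs (s : Int)).flatMap
          (fun iv => F iv.2 (PySem.List.pyGetD colors iv.1 "")) =
        (vs.zip (colors.drop s)).flatMap (fun vc => F vc.1 vc.2) := by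
  intro vs
  induction vs with
  | nil => intro colors s _; simp [PySem.List.enumerate_nil]
  | cons v t ih =>
      intro colors s hlen
      have hs : s < colors.length := by simp at hlen; omega
      rw [PySem.List.enumerate_cons]
      have hdrop : colors.drop s = colors[s] :: colors.drop (s + 1) :=
        List.drop_eq_getElem_cons hs
      rw [hdrop]
      simp only [List.zip_cons_cons, List.flatMap_cons]
      have hgetD : PySem.List.pyGetD colors ((s : Int)) "" = colors[s] := by
        rw [PySem.List.pyGetD_natCast]
        simp [List.getD, hs]
      rw [hgetD]
      have := ih colors (s + 1) (by simp at hlen ⊢; omega)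
      rw [show ((s : Int) + 1) = ((s + 1 : Nat) : Int) by push_cast; ring, this]

lemma pvGather_eq (full_text : String) (violations : List (List (String × String))) (colors : List String)
    (hlen : violations.length ≤ colors.length) :
    pvGatherA full_text violations colors = pvGatherB full_text violations colors := by
  unfold pvGatherA pvGatherB
  rw [PySem.List.foldl_append_eq_flatMap, PySem.List.foldl_append_eq_flatMap]
  simp only [List.nil_append]
  have := pvEnum_zip (X := Nat × Nat × String)
    (fun v c =>
      if PySem.Str.strip (PySem.Dict.getD (⟨v⟩ : PySem.Dict String String) "excerpt_content" "") ≠ "" then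
        pvScanA full_text.toList
          (PySem.Str.strip (PySem.Dict.getD (⟨v⟩ : PySem.Dict String String) "excerpt_content" "")).toList c 0
      else []) violations colors 0 (by omega)
  simp only [Int.ofNat_zero, List.drop_zero] at this
  rw [this]
  congr 1
  funext vc
  rw [pvScan_eq full_text.toList _ _ 0 (Nat.zero_le _)]

-- every triple B's walk emits is a well-bounded occurrence: s ≤ e ≤ |text|
lemma pvScanB_bounds (text excerpt : List Char) (color : String) :
    ∀ i, ∀ p ∈ pvScanB text excerpt color i, p.1 ≤ p.2.1 ∧ p.2.1 ≤ text.length := by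
  intro i
  fun_induction pvScanB text excerpt color i with
  | case1 i hex => simp
  | case2 i hex h hsw ih =>
      intro p hp
      simp only [List.mem_cons] at hp
      rcases hp with rfl | hp
      · exact ⟨by simp, by simp only []; omega⟩
      · exact ih p hp
  | case3 i hex h hsw ih => exact ih
  | case4 i hex h => simp

lemma pvGatherB_bounds (full_text : String) (violations : List (List (String × String))) (colors : List String) :
    ∀ p ∈ pvGatherB full_text violations colors, p.1 ≤ p.2.1 ∧ p.2.1 ≤ full_text.toList.length := by
  intro p hp
  unfold pvGatherB at hp
  rw [PySem.List.foldl_append_eq_flatMap] at hp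
  simp only [List.nil_append, List.mem_flatMap] at hp
  obtain ⟨vc, _, hpin⟩ := hp
  split at hpin
  · exact pvScanB_bounds full_text.toList _ _ 0 p hpin
  · simp at hpin

lemma pvMem_insert_fold (xs : List (Nat × Nat × String)) :
    ∀ (acc : List (Nat × Nat × String)) (p : Nat × Nat × String),
      p ∈ xs.foldl (fun acc x => PySem.List.insertBy pvLt3 x acc) acc → p ∈ acc ∨ p ∈ xs := by
  induction xs with
  | nil => intro acc p hp; exact Or.inl hp
  | cons x t ih =>
      intro acc p hp
      simp only [List.foldl_cons] at hp
      rcases ih _ p hp with hin | hin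
      · rcases (PySem.List.mem_insertBy _ _ _ _).1 hin with rfl | hin
        · exact Or.inr List.mem_cons_self
        · exact Or.inl hin
      · exact Or.inr (List.mem_cons_of_mem _ hin)

lemma pvMem_sort3 (xs : List (Nat × Nat × String)) :
    ∀ p ∈ pvSort3 xs, p ∈ xs := by
  intro p hp
  rcases pvMem_insert_fold xs [] p hp with h | h
  · simp at h
  · exact h

-- ---- deriving the sorted-disjoint chain from the closed-form Pre_ ----

-- interval disjointness of two match triples
def pvDisj (a b : Nat × Nat × String) : Prop := a.2.1 ≤ b.1 ∨ b.2.1 ≤ a.1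

lemma pvDisj_symm : Symmetric pvDisj := fun _ _ h => h.elim Or.inr Or.inl

-- the Python tuple order as a key into a lexicographic linear order
def pvKey (p : Nat × Nat × String) : Lex (Nat × Lex (Nat × String)) :=
  toLex (p.1, toLex (p.2.1, p.2.2))

lemma pvLt3_eq_key (a b : Nat × Nat × String) : pvLt3 a b = decide (pvKey a < pvKey b) := by
  unfold pvLt3 pvKey
  simp [Prod.Lex.lt_iff]

lemma pvSort3_eq_sorted (xs : List (Nat × Nat × String)) :
    pvSort3 xs = PySem.List.sorted xs pvKey false := by
  rw [PySem.List.sorted_eq_foldl_insertBy]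
  unfold pvSort3
  congr 1
  funext acc x
  congr 1
  funext a b
  exact pvLt3_eq_key a b

-- every triple B's walk emits: an occurrence of the excerpt, end = start + |excerpt|, start ≥ i
lemma pvScanB_mem (text excerpt : List Char) (color : String) :
    ∀ i, ∀ p ∈ pvScanB text excerpt color i,
      excerpt <+: text.drop p.1 ∧ p.2.1 = p.1 + excerpt.length ∧ i ≤ p.1 := by
  intro i
  fun_induction pvScanB text excerpt color i with
  | case1 i hex => simp
  | case2 i hex h hsw ih =>
      intro p hp
      simp only [List.mem_cons] at hp
      rcases hp with rfl | hp
      · exact ⟨(PySem.Chars.startswith_iff _ _).1 hsw, rfl, le_rfl⟩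
      · have := ih p hp
        exact ⟨this.1, this.2.1, by omega⟩
  | case3 i hex h hsw ih =>
      intro p hp
      have := ih p hp
      exact ⟨this.1, this.2.1, by omega⟩
  | case4 i hex h => simp

-- within one scan the recorded intervals are increasing by at least |excerpt|
lemma pvScanB_pairwise (text excerpt : List Char) (color : String) :
    ∀ i, (pvScanB text excerpt color i).Pairwise (fun a b => a.1 + excerpt.length ≤ b.1) := by
  intro i
  fun_induction pvScanB text excerpt color i with
  | case1 i hex => simp
  | case2 i hex h hsw ih =>
      refine List.Pairwise.cons ?_ ih
      intro b hb
      have := (pvScanB_mem text excerpt color _ b hb).2.2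
      simpa using this
  | case3 i hex h hsw ih => exact ih
  | case4 i hex h => simp

-- pvGatherB as a flatMap over the zipped pairs
lemma pvGatherB_eq_flatMap (full_text : String) (violations : List (List (String × String))) (colors : List String) :
    pvGatherB full_text violations colors
      = (violations.zip colors).flatMap
          (fun vc =>
            if PySem.Str.strip (PySem.Dict.getD (⟨vc.1⟩ : PySem.Dict String String) "excerpt_content" "") ≠ "" then
              pvScanB full_text.toList
                (PySem.Str.strip (PySem.Dict.getD (⟨vc.1⟩ : PySem.Dict String String) "excerpt_content" "")).toList vc.2 0
            else []) := by
  unfold pvGatherB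
  rw [PySem.List.foldl_append_eq_flatMap]
  simp

-- every gather entry is an occurrence of the excerpt of some violation of the list
lemma pvGatherB_mem_occ (full_text : String) (violations : List (List (String × String))) (colors : List String) :
    ∀ b ∈ pvGatherB full_text violations colors,
      ∃ w ∈ violations, pvExcerptOf w ≠ [] ∧ pvExcerptOf w <+: full_text.toList.drop b.1 ∧
        b.2.1 = b.1 + (pvExcerptOf w).length := by
  intro b hb
  rw [pvGatherB_eq_flatMap] at hb
  simp only [List.mem_flatMap] at hb
  obtain ⟨⟨w0, c0⟩, hvc, hbin⟩ := hb
  by_cases hne : PySem.Str.strip (PySem.Dict.getD (⟨w0⟩ : PySem.Dict String String) "excerpt_content" "") ≠ ""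
  · rw [if_pos hne] at hbin
    have hm := pvScanB_mem full_text.toList _ c0 0 b hbin
    refine ⟨w0, (List.of_mem_zip hvc).1, ?_, hm.1, hm.2.1⟩
    intro hnil
    exact hne (String.toList_eq_nil_iff.1 hnil)
  · rw [if_neg hne] at hbin
    simp at hbin

-- all gather entries are pairwise interval-disjoint, from Pre_'s clause (b)
lemma pvGatherB_pairwise_disj (full_text : String) :
    ∀ (violations : List (List (String × String))) (colors : List String),
      List.Pairwise (fun v w =>
        ∀ p ∈ List.range (full_text.toList.length + 1), ∀ q ∈ List.range (full_text.toList.length + 1),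
          pvExcerptOf v ≠ [] → pvExcerptOf w ≠ [] →
          pvExcerptOf v <+: full_text.toList.drop p → pvExcerptOf w <+: full_text.toList.drop q →
          p + (pvExcerptOf v).length ≤ q ∨ q + (pvExcerptOf w).length ≤ p) violations →
      (pvGatherB full_text violations colors).Pairwise pvDisj := by
  intro violations
  induction violations with
  | nil =>
      intro colors _
      rw [pvGatherB_eq_flatMap]
      simp
  | cons v t ih =>
      intro colors hpair
      cases colors with
      | nil =>
          rw [pvGatherB_eq_flatMap]
          simp
      | cons c ct =>
          have hrest : (pvGatherB full_text t ct).Pairwise pvDisj := ih ct hpair.tail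
          have hhead := (List.pairwise_cons.1 hpair).1
          rw [pvGatherB_eq_flatMap] at hrest ⊢
          simp only [List.zip_cons_cons, List.flatMap_cons]
          rw [List.pairwise_append]
          refine ⟨?_, hrest, ?_⟩
          · -- within v's own scan
            by_cases hne : PySem.Str.strip (PySem.Dict.getD (⟨v⟩ : PySem.Dict String String) "excerpt_content" "") ≠ ""
            · rw [if_pos hne]
              have hpw := pvScanB_pairwise full_text.toList
                (PySem.Str.strip (PySem.Dict.getD (⟨v⟩ : PySem.Dict String String) "excerpt_content" "")).toList c 0
              refine hpw.imp_of_mem ?_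
              intro a b ha hb hab
              have hma := pvScanB_mem full_text.toList _ c 0 a ha
              exact Or.inl (by rw [hma.2.1]; exact hab)
            · rw [if_neg hne]; simp
          · -- v's entries vs later entries
            intro a ha b hb
            rw [← pvGatherB_eq_flatMap] at hb
            obtain ⟨w, hw, hwne, hwocc, hwend⟩ := pvGatherB_mem_occ full_text t ct b hb
            by_cases hne : PySem.Str.strip (PySem.Dict.getD (⟨v⟩ : PySem.Dict String String) "excerpt_content" "") ≠ ""
            · rw [if_pos hne] at ha
              have hma := pvScanB_mem full_text.toList _ c 0 a ha
              have hvne : pvExcerptOf v ≠ [] := fun hnil =>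
                hne (String.toList_eq_nil_iff.1 hnil)
              have hvocc : pvExcerptOf v <+: full_text.toList.drop a.1 := hma.1
              have hvlen : (pvExcerptOf v).length ≠ 0 := by
                simpa [List.length_eq_zero_iff] using hvne
              have hwlen : (pvExcerptOf w).length ≠ 0 := by
                simpa [List.length_eq_zero_iff] using hwne
              have hpa : a.1 + (pvExcerptOf v).length ≤ full_text.toList.length :=
                pvOcc_fits _ _ _ hvlen hvocc
              have hqb : b.1 + (pvExcerptOf w).length ≤ full_text.toList.length :=
                pvOcc_fits _ _ _ hwlen hwocc
              have hfl : full_text.toList.length = full_text.length := by simp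
              have := hhead w hw a.1 (by simp only [List.mem_range]; omega) b.1 (by simp only [List.mem_range]; omega) hvne hwne hvocc hwocc
              unfold pvDisj
              have hva : a.2.1 = a.1 + (pvExcerptOf v).length := hma.2.1
              rw [hva, hwend]
              exact this
            · rw [if_neg hne] at ha
              simp at ha

-- a pairwise-ordered list is a chain
lemma pvIsChain_of_pairwise {α : Type} {R : α → α → Prop} :
    ∀ {l : List α}, l.Pairwise R → l.IsChain R := by
  intro l h
  induction l with
  | nil => exact List.IsChain.nil
  | cons a t ih =>
      cases t with
      | nil => exact List.isChain_singleton a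
      | cons b u =>
          rw [List.isChain_cons_cons]
          have := List.pairwise_cons.1 h
          exact ⟨this.1 b List.mem_cons_self, ih this.2⟩

-- sorted, pairwise-disjoint, non-degenerate intervals form the chain pvRebuild_eq needs
lemma pvSort3_chain (xs : List (Nat × Nat × String))
    (hstrict : ∀ p ∈ xs, p.1 < p.2.1)
    (hdisj : xs.Pairwise pvDisj) :
    List.IsChain (fun a b => a.2.1 ≤ b.1) (pvSort3 xs) := by
  have hperm : (pvSort3 xs).Perm xs := by
    rw [pvSort3_eq_sorted]
    exact PySem.List.sorted_perm xs pvKey false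
  have hdisj' : (pvSort3 xs).Pairwise pvDisj :=
    (hperm.pairwise_iff (fun {a b} h => pvDisj_symm h)).2 hdisj
  have hkey : (pvSort3 xs).Pairwise (fun a b => pvKey a ≤ pvKey b) := by
    rw [pvSort3_eq_sorted]
    exact PySem.List.sorted_pairwise xs pvKey
  apply pvIsChain_of_pairwise
  refine (hkey.and hdisj').imp_of_mem ?_
  intro a b ha hb hab
  rcases hab.2 with hle | hba
  · exact hle
  · -- impossible: b ends before a starts while a sorts no later than b
    have hab1 : a.1 ≤ b.1 := by
      have h1 := hab.1
      unfold pvKey at h1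
      rcases Prod.Lex.le_iff.1 h1 with hlt | ⟨heq, _⟩
      · exact le_of_lt hlt
      · exact le_of_eq heq
    have hbmem : b ∈ xs := hperm.subset hb
    have := hstrict b hbmem
    omega

-- the core: A's offset splicing over sorted, pairwise-disjoint occurrences equals B's segment build
lemma pvRebuild_eq (ft : List Char) :
    ∀ (ps : List (Nat × Nat × String)) (pre : List Char) (last off : Nat),
      off + last = pre.length → last ≤ ft.length →
      (∀ p ∈ ps, p.1 ≤ p.2.1 ∧ p.2.1 ≤ ft.length) →
      List.IsChain (fun a b => a.2.1 ≤ b.1) ps →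
      (∀ q ∈ ps.head?, last ≤ q.1) →
      (ps.foldl pvStepA (pre ++ ft.drop last, off)).1
        = (ps.foldl (pvStepB ft) (pre, last)).1
            ++ ft.drop (ps.foldl (pvStepB ft) (pre, last)).2 := by
  intro ps
  induction ps with
  | nil => intro pre last off _ _ _ _ _; simp
  | cons hd tl ih =>
      intro pre last off hoff hlast hbounds hchain hhead
      obtain ⟨s, e, c⟩ := hd
      have hse : s ≤ e ∧ e ≤ ft.length := hbounds _ List.mem_cons_self
      have hls : last ≤ s := by
        have := hhead (s, e, c); simp at this; exact this
      simp only [List.foldl_cons]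
      have hstepA : pvStepA (pre ++ ft.drop last, off) (s, e, c)
          = (pre ++ (ft.drop last).take (s - last) ++ pvOpenTag c
               ++ (ft.drop s).take (e - s) ++ pvCloseTag ++ ft.drop e,
             off + ((pvOpenTag c).length + pvCloseTag.length)) := by
        unfold pvStepA
        simp only [PySem.List.slice_to_natCast, PySem.List.slice_natCast,
          PySem.List.slice_from_natCast]
        have hple : pre.length ≤ s + off := by omega
        have h1 : (pre ++ ft.drop last).take (s + off)
            = pre ++ (ft.drop last).take (s - last) := by
          rw [List.take_append, List.take_of_length_le hple]
          have he : s + off - pre.length = s - last := by omega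
          rw [he]
        have h2 : (pre ++ ft.drop last).drop (s + off) = ft.drop s := by
          rw [List.drop_append, List.drop_eq_nil_of_le hple]
          rw [List.nil_append, List.drop_drop]
          congr 1
          omega
        have h3 : (pre ++ ft.drop last).drop (e + off) = ft.drop e := by
          rw [List.drop_append, List.drop_eq_nil_of_le (by omega : pre.length ≤ e + off)]
          rw [List.nil_append, List.drop_drop]
          congr 1
          omega
        have h4 : e + off - (s + off) = e - s := by omega
        rw [h1, h2, h3, h4]
      have hstepB : pvStepB ft (pre, last) (s, e, c)
          = (pre ++ (ft.drop last).take (s - last) ++ pvOpenTag c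
               ++ (ft.drop s).take (e - s) ++ pvCloseTag, e) := by
        unfold pvStepB
        simp only [PySem.List.slice_natCast]
      rw [hstepA, hstepB]
      have hpre' : (off + ((pvOpenTag c).length + pvCloseTag.length)) + e
          = (pre ++ (ft.drop last).take (s - last) ++ pvOpenTag c
               ++ (ft.drop s).take (e - s) ++ pvCloseTag).length := by
        simp only [List.length_append, List.length_take, List.length_drop]
        omega
      have hbt : ∀ p ∈ tl, p.1 ≤ p.2.1 ∧ p.2.1 ≤ ft.length :=
        fun p hp => hbounds p (List.mem_cons_of_mem _ hp)
      have hct : List.IsChain (fun a b => a.2.1 ≤ b.1) tl := hchain.tail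
      have hht : ∀ q ∈ tl.head?, e ≤ q.1 := by
        intro q hq
        cases tl with
        | nil => simp at hq
        | cons b t =>
            simp only [List.head?_cons, Option.mem_some_iff] at hq
            subst hq
            exact (List.isChain_cons_cons.1 hchain).1
      have := ih (pre ++ (ft.drop last).take (s - last) ++ pvOpenTag c
               ++ (ft.drop s).take (e - s) ++ pvCloseTag)
          e (off + ((pvOpenTag c).length + pvCloseTag.length)) hpre' hse.2 hbt hct hht
      exact this

-- ===== VERDICT (by name: the statement is the Claim_ definition above) =====
theorem highlight_excerpts_spec : Claim_equal_highlight_excerpts := by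
  intro ft viols colors _hdom hpre
  unfold Spec_highlight_excerpts highlight_excerpts highlight_excerpts_alt
  rw [pvGather_eq ft viols colors hpre.1]
  have hb : ∀ p ∈ pvSort3 (pvGatherB ft viols colors), p.1 ≤ p.2.1 ∧ p.2.1 ≤ ft.toList.length :=
    fun p hp => pvGatherB_bounds ft viols colors p (pvMem_sort3 _ p hp)
  have hstrict : ∀ p ∈ pvGatherB ft viols colors, p.1 < p.2.1 := by
    intro p hp
    obtain ⟨w, _, hwne, _, hwend⟩ := pvGatherB_mem_occ ft viols colors p hp
    have : (pvExcerptOf w).length ≠ 0 := by simpa [List.length_eq_zero_iff] using hwne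
    omega
  have hchain := pvSort3_chain (pvGatherB ft viols colors) hstrict
    (pvGatherB_pairwise_disj ft viols colors hpre.2)
  have hmain := pvRebuild_eq ft.toList (pvSort3 (pvGatherB ft viols colors)) [] 0 0 rfl
    (Nat.zero_le _) hb hchain (fun q _ => Nat.zero_le _)
  simp only [List.nil_append, List.drop_zero] at hmain
  rw [hmain]
  simp [PySem.List.slice_from_natCast]
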